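-- pv_equiv track=rewrite | github.com/bidcoinauction/gsmgio_puzzle_kit | simple_movement_tester.py | fibonacci_order
-- ===== SOURCE A (Python) =====
-- from typing import List, Tuple
--
-- def fibonacci_order(coords: List[Tuple[int, int]]) -> List[int]:
--     """Order coordinates based on Fibonacci sequence."""
--     def fibonacci(n):
--         if n <= 1:
--             return n
--         a, b = 0, 1
--         for _ in range(2, n + 1):
--             a, b = b, a + b
--         return b
--
--     def fib_score(coord):
--         x, y = coord
--         return fibonacci(x % 20) + fibonacci(y % 20)
--
--     indexed_coords = [(i, coord) for i, coord in enumerate(coords)]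
--     sorted_coords = sorted(indexed_coords, key=lambda x: fib_score(x[1]))
--     return [i for i, _ in sorted_coords]
-- ===== SOURCE B (Python) =====
-- from typing import List, Tuple
--
-- def fibonacci_order(coords: List[Tuple[int, int]]) -> List[int]:
--     """Order coordinate indices by Fibonacci score using score buckets
--     (bucket table + sorted distinct keys) instead of a comparison sort."""
--     def fib(n):
--         a, b = 0, 1
--         for _ in range(n):
--             a, b = b, a + b
--         return a
--
--     buckets = {}
--     for i, (x, y) in enumerate(coords):
--         s = fib(x % 20) + fib(y % 20)
--         buckets.setdefault(s, []).append(i)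
--     out = []
--     for s in sorted(buckets):
--         out.extend(buckets[s])
--     return out
-- ===== Notes on version B (the rewrite author's own statement) =====
-- stated objective: alternative
-- what changed: Replaces A's comparison sort of the indexed coordinates by a single pass that buckets indices under their Fibonacci score in a dict, then concatenates the buckets along the sorted distinct scores (stable by construction).
import Mathlib
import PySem

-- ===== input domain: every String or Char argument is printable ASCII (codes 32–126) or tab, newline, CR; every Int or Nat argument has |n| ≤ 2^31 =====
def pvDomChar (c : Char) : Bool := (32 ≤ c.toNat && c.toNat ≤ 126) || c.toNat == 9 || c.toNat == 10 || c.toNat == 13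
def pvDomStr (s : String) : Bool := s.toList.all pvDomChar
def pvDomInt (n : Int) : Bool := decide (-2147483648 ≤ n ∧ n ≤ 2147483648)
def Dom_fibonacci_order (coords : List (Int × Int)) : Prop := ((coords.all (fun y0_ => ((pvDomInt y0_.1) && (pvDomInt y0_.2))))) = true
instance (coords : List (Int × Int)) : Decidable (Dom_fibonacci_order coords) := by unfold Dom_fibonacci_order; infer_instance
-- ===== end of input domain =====

-- B replaces A's comparison sort of the indexed coordinates by a bucket table
-- (score -> indices in order) concatenated along the sorted distinct scores;
-- objective: alternative (same exact output, different algorithm).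

-- ===== PORT A =====
def pvFibA (n : Int) : Int :=
  if n ≤ 1 then n
  else ((PySem.List.pyRange 2 (n+1) 1).foldl (fun (ab : Int × Int) _ => (ab.2, ab.1 + ab.2)) (0, 1)).2

def pvScoreA (c : Int × Int) : Int := pvFibA (PySem.Int.mod c.1 20) + pvFibA (PySem.Int.mod c.2 20)

def fibonacci_order (coords : List (Int × Int)) : List Int :=
  let indexed_coords := PySem.List.enumerate coords 0
  let sorted_coords := PySem.List.sorted indexed_coords (fun x => pvScoreA x.2) false
  sorted_coords.map (fun p => p.1)

-- ===== PORT B =====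
def pvFibB (n : Int) : Int :=
  ((PySem.List.pyRange 0 n 1).foldl (fun (ab : Int × Int) _ => (ab.2, ab.1 + ab.2)) (0, 1)).1

def pvScoreB (c : Int × Int) : Int := pvFibB (PySem.Int.mod c.1 20) + pvFibB (PySem.Int.mod c.2 20)

def pvBuckets (coords : List (Int × Int)) : PySem.Dict Int (List Int) :=
  (PySem.List.enumerate coords 0).foldl
    (fun d p => d.insert (pvScoreB p.2) (d.getD (pvScoreB p.2) [] ++ [p.1]))
    PySem.Dict.empty

def fibonacci_order_alt (coords : List (Int × Int)) : List Int :=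
  let buckets := pvBuckets coords
  (PySem.List.sorted buckets.keys (fun k => k) false).foldl
    (fun out s => out ++ buckets.getD s []) []

-- ===== PRECONDITION & SPEC =====
def Spec_fibonacci_order (coords : List (Int × Int)) (out : List Int) : Prop := out = fibonacci_order_alt coords
instance (coords : List (Int × Int)) (out : List Int) : Decidable (Spec_fibonacci_order coords out) := by unfold Spec_fibonacci_order; infer_instance

-- ===== CLAIM (what is proved, stated in full; the proofs are below) =====
def Claim_equal_fibonacci_order : Prop := ∀ (coords : List (Int × Int)), Dom_fibonacci_order coords → Spec_fibonacci_order coords (fibonacci_order coords)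

-- ===== LEMMAS AND PROOFS =====

-- the "stable order" relation: increasing score, ties by increasing original index
def pvR (key : Int × Int × Int → Int) (a b : Int × Int × Int) : Prop :=
  key a < key b ∨ (key a = key b ∧ a.1 < b.1)

lemma pvMod20 (a : Int) : 0 ≤ PySem.Int.mod a 20 ∧ PySem.Int.mod a 20 < 20 := by
  unfold PySem.Int.mod
  rw [Int.fmod_eq_emod]
  simp only [show ((0:Int) ≤ 20 ∨ (20:Int) ∣ a) from Or.inl (by norm_num), if_pos, add_zero]
  exact ⟨Int.emod_nonneg a (by norm_num), Int.emod_lt_of_pos a (by norm_num)⟩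

lemma pvFib_eq (n : Int) (h0 : 0 ≤ n) (h1 : n < 20) : pvFibA n = pvFibB n := by
  interval_cases n <;> decide

lemma pvScore_eq (c : Int × Int) : pvScoreA c = pvScoreB c := by
  unfold pvScoreA pvScoreB
  rw [pvFib_eq _ (pvMod20 c.1).1 (pvMod20 c.1).2, pvFib_eq _ (pvMod20 c.2).1 (pvMod20 c.2).2]

lemma pvInsertBy_split {α : Type} (before : α → α → Bool) (x : α) (l : List α) :
    PySem.List.insertBy before x l
      = l.takeWhile (fun y => !before x y) ++ x :: l.dropWhile (fun y => !before x y) := by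
  induction l with
  | nil => simp [PySem.List.insertBy]
  | cons y ys ih =>
    by_cases h : before x y = true <;>
      simp [PySem.List.insertBy, h, ih]

lemma pvSorted_append_singleton (key : Int × Int × Int → Int) (l : List (Int × Int × Int)) (x : Int × Int × Int) :
    PySem.List.sorted (l ++ [x]) key false
      = PySem.List.insertBy (fun a b => decide (key a < key b)) x (PySem.List.sorted l key false) := by
  rw [PySem.List.sorted_eq_foldl_insertBy, PySem.List.sorted_eq_foldl_insertBy, List.foldl_append]
  rfl

lemma pvDropWhile_key_gt (key : Int × Int × Int → Int) (x : Int × Int × Int) (S : List (Int × Int × Int))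
    (hS : S.Pairwise (fun a b => key a ≤ key b)) :
    ∀ b ∈ S.dropWhile (fun y => !decide (key x < key y)), key x < key b := by
  intro b hb
  cases hD : S.dropWhile (fun y => !decide (key x < key y)) with
  | nil => rw [hD] at hb; simp at hb
  | cons h0 D' =>
    have hne : S.dropWhile (fun y => !decide (key x < key y)) ≠ [] := by rw [hD]; simp
    have hh := List.head_dropWhile_not (fun y => !decide (key x < key y)) hne
    simp only [hD, List.head_cons] at hh
    simp at hh
    have hPD : (h0 :: D').Pairwise (fun a b => key a ≤ key b) := by
      rw [← hD]; exact hS.sublist (List.dropWhile_sublist _)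
    rw [hD] at hb
    rcases List.mem_cons.mp hb with rfl | hb'
    · exact hh
    · exact lt_of_lt_of_le hh ((List.pairwise_cons.mp hPD).1 b hb')

lemma pvSorted_stable (key : Int × Int × Int → Int) (l : List (Int × Int × Int))
    (h : l.Pairwise (fun a b => a.1 < b.1)) :
    (PySem.List.sorted l key false).Pairwise (pvR key) := by
  induction l using List.reverseRecOn with
  | nil =>
    have : PySem.List.sorted ([] : List (Int × Int × Int)) key false = [] :=
      (PySem.List.sorted_eq_nil_iff _ _ _).mpr rfl
    rw [this]; exact List.Pairwise.nil
  | append_singleton l x ih =>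
    have hsplit := List.pairwise_append.mp h
    have hl : l.Pairwise (fun a b => a.1 < b.1) := hsplit.1
    have hx : ∀ y ∈ l, y.1 < x.1 := by
      intro y hy; exact hsplit.2.2 y hy x (List.mem_singleton_self x)
    have hS : (PySem.List.sorted l key false).Pairwise (pvR key) := ih hl
    have hSle : (PySem.List.sorted l key false).Pairwise (fun a b => key a ≤ key b) :=
      PySem.List.sorted_pairwise l key
    rw [pvSorted_append_singleton, pvInsertBy_split]
    set S := PySem.List.sorted l key false with hSdef
    set p : Int × Int × Int → Bool := fun y => !decide (key x < key y) with hp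
    have hmemS : ∀ y ∈ S, y ∈ l := fun y hy => (PySem.List.mem_sorted l key false y).mp hy
    have hD : ∀ b ∈ S.dropWhile p, key x < key b := pvDropWhile_key_gt key x S hSle
    have hT : ∀ a ∈ S.takeWhile p, key a ≤ key x := by
      intro a ha
      have := List.mem_takeWhile_imp ha
      rw [hp] at this; simp at this; exact this
    rw [List.pairwise_append]
    refine ⟨hS.sublist (List.takeWhile_sublist _), ?_, ?_⟩
    · rw [List.pairwise_cons]
      refine ⟨fun b hb => Or.inl (hD b hb), hS.sublist (List.dropWhile_sublist _)⟩
    · intro a ha b hb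
      rcases List.mem_cons.mp hb with rfl | hb'
      · rcases lt_or_eq_of_le (hT a ha) with hlt | heq
        · exact Or.inl hlt
        · exact Or.inr ⟨heq, hx a (hmemS a ((List.takeWhile_sublist p).mem ha))⟩
      · exact Or.inl (lt_of_le_of_lt (hT a ha) (hD b hb'))

lemma pvPairwise_flatMap (key : Int × Int × Int → Int) (ks : List Int) (g : Int → List (Int × Int × Int))
    (hks : ks.Pairwise (· < ·))
    (hkey : ∀ s ∈ ks, ∀ q ∈ g s, key q = s)
    (hg : ∀ s ∈ ks, (g s).Pairwise (fun a b => a.1 < b.1)) :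
    (ks.flatMap g).Pairwise (pvR key) := by
  induction ks with
  | nil => simp
  | cons s ks' ih =>
    rw [List.flatMap_cons, List.pairwise_append]
    have hcons := List.pairwise_cons.mp hks
    refine ⟨?_, ?_, ?_⟩
    · -- inside one bucket: equal keys, increasing indices
      have hgs := hg s (List.mem_cons_self)
      have hks' := hkey s (List.mem_cons_self)
      exact hgs.imp_of_mem (fun {a b} ha hb hab =>
        Or.inr ⟨by rw [hks' a ha, hks' b hb], hab⟩)
    · exact ih hcons.2 (fun t ht => hkey t (List.mem_cons_of_mem s ht))
        (fun t ht => hg t (List.mem_cons_of_mem s ht))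
    · intro a ha b hb
      rcases List.mem_flatMap.mp hb with ⟨t, ht, hbt⟩
      left
      rw [hkey s List.mem_cons_self a ha, hkey t (List.mem_cons_of_mem s ht) b hbt]
      exact hcons.1 t ht

lemma pvFlatMap_congr_mem {α β : Type} (ks : List α) (f g : α → List β)
    (h : ∀ s ∈ ks, f s = g s) : ks.flatMap f = ks.flatMap g := by
  induction ks with
  | nil => rfl
  | cons s ks' ih =>
    rw [List.flatMap_cons, List.flatMap_cons, h s List.mem_cons_self,
      ih (fun t ht => h t (List.mem_cons_of_mem s ht))]

lemma pvFlatMap_filter_perm (key : Int × Int × Int → Int) :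
    ∀ (ks : List Int) (xs : List (Int × Int × Int)), ks.Nodup → (∀ x ∈ xs, key x ∈ ks) →
      (ks.flatMap (fun s => xs.filter (fun q => key q == s))).Perm xs := by
  intro ks
  induction ks with
  | nil =>
    intro xs _ hcov
    cases xs with
    | nil => simp
    | cons y ys => exact absurd (hcov y List.mem_cons_self) (by simp)
  | cons s ks' ih =>
    intro xs hnd hcov
    rw [List.flatMap_cons]
    have hstep : ∀ t ∈ ks',
        xs.filter (fun q => key q == t)
          = (xs.filter (fun q => !(key q == s))).filter (fun q => key q == t) := by
      intro t ht
      rw [List.filter_filter]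
      apply List.filter_congr
      intro q _
      by_cases hq : key q = t
      · have hts : t ≠ s := by rintro rfl; exact (List.nodup_cons.mp hnd).1 ht
        have hqs : key q ≠ s := by rw [hq]; exact hts
        simp only [hq]
        simp [hts]
      · simp [hq]
    rw [pvFlatMap_congr_mem ks' _ _ hstep]
    have hcov' : ∀ x ∈ xs.filter (fun q => !(key q == s)), key x ∈ ks' := by
      intro x hx
      have hmem := List.mem_filter.mp hx
      rcases List.mem_cons.mp (hcov x hmem.1) with h | h
      · exfalso; have h2 := hmem.2; simp [h] at h2
      · exact h
    have hperm := ih (xs.filter (fun q => !(key q == s))) (List.nodup_cons.mp hnd).2 hcov'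
    exact (hperm.append_left _).trans (List.filter_append_perm _ xs)

-- stable sort by key = buckets of the sorted distinct keys, in order
lemma pvStable_buckets (key : Int × Int × Int → Int) (l : List (Int × Int × Int))
    (hidx : l.Pairwise (fun a b => a.1 < b.1)) :
    PySem.List.sorted l key false
      = (PySem.List.sorted (PySem.Set.ofList (l.map key)) (fun k => k) false).flatMap
          (fun s => l.filter (fun q => key q == s)) := by
  set ks := PySem.List.sorted (PySem.Set.ofList (l.map key)) (fun k => k) false with hksdef
  have hkslt : ks.Pairwise (· < ·) := PySem.List.sorted_ofList_pairwise_lt _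
  have hksnd : ks.Nodup := hkslt.imp (fun h => ne_of_lt h)
  have hcov : ∀ x ∈ l, key x ∈ ks := by
    intro x hx
    rw [hksdef, PySem.List.mem_sorted, PySem.Set.mem_ofList]
    exact List.mem_map_of_mem hx
  have hperm : (PySem.List.sorted l key false).Perm
      (ks.flatMap (fun s => l.filter (fun q => key q == s))) :=
    (PySem.List.sorted_perm l key false).trans (pvFlatMap_filter_perm key ks l hksnd hcov).symm
  have hP1 : (PySem.List.sorted l key false).Pairwise (pvR key) := pvSorted_stable key l hidx
  have hP2 : (ks.flatMap (fun s => l.filter (fun q => key q == s))).Pairwise (pvR key) := by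
    apply pvPairwise_flatMap key ks _ hkslt
    · intro s _ q hq
      exact eq_of_beq (List.mem_filter.mp hq).2
    · intro s _
      exact hidx.sublist List.filter_sublist
  exact List.Perm.eq_of_pairwise
    (fun a b _ _ h1 h2 => by
      exfalso
      rcases h1 with h1 | ⟨e1, i1⟩ <;> rcases h2 with h2 | ⟨e2, i2⟩ <;> omega)
    hP1 hP2 hperm

lemma pvBuckets_getD : ∀ (l : List (Int × Int × Int)) (d : PySem.Dict Int (List Int)) (s : Int),
    (l.foldl (fun d p => d.insert (pvScoreB p.2) (d.getD (pvScoreB p.2) [] ++ [p.1])) d).getD s []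
      = d.getD s [] ++ (l.filter (fun q => pvScoreB q.2 == s)).map (fun q => q.1) := by
  intro l
  induction l with
  | nil => intro d s; simp
  | cons p l ih =>
    intro d s
    rw [List.foldl_cons, ih, PySem.Dict.getD_insert, List.filter_cons]
    by_cases h : pvScoreB p.2 = s
    · simp [h]
    · have h' : ¬ s = pvScoreB p.2 := fun e => h e.symm
      simp [h, h']

lemma pvBuckets_keys (coords : List (Int × Int)) :
    (pvBuckets coords).keys
      = PySem.Set.ofList ((PySem.List.enumerate coords 0).map (fun p => pvScoreB p.2)) := by
  unfold pvBuckets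
  rw [show (fun (d : PySem.Dict Int (List Int)) (p : Int × Int × Int) =>
        d.insert (pvScoreB p.2) (d.getD (pvScoreB p.2) [] ++ [p.1]))
      = (fun d p => d.insert ((fun q : Int × Int × Int => pvScoreB q.2) p)
          ((fun (d : PySem.Dict Int (List Int)) (q : Int × Int × Int) => d.getD (pvScoreB q.2) [] ++ [q.1]) d p)) from rfl,
    PySem.Dict.keys_foldl_insert_key]
  rw [PySem.Set.ofList_eq_foldl]
  rfl

lemma pvAlt_eq (coords : List (Int × Int)) :
    fibonacci_order_alt coords
      = (PySem.List.sorted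
            (PySem.Set.ofList ((PySem.List.enumerate coords 0).map (fun p => pvScoreB p.2)))
            (fun k => k) false).flatMap
          (fun s => ((PySem.List.enumerate coords 0).filter (fun q => pvScoreB q.2 == s)).map (fun q => q.1)) := by
  unfold fibonacci_order_alt
  rw [PySem.List.foldl_append_eq_flatMap, List.nil_append, pvBuckets_keys]
  apply pvFlatMap_congr_mem
  intro s _
  unfold pvBuckets
  rw [pvBuckets_getD]
  rfl

-- ===== VERDICT (by name: the statement is the Claim_ definition above) =====
theorem fibonacci_order_spec : Claim_equal_fibonacci_order := by
  unfold Claim_equal_fibonacci_order Spec_fibonacci_order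
  intro coords _
  show (PySem.List.sorted (PySem.List.enumerate coords 0) (fun x => pvScoreA x.2) false).map (fun p => p.1)
      = fibonacci_order_alt coords
  have hkey : (fun x : Int × Int × Int => pvScoreA x.2) = (fun x : Int × Int × Int => pvScoreB x.2) := by
    funext x; exact pvScore_eq x.2
  rw [hkey, pvStable_buckets (fun x => pvScoreB x.2) (PySem.List.enumerate coords 0)
        (PySem.List.pairwise_lt_enumerate coords 0),
      List.map_flatMap, pvAlt_eq]
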